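-- pv_equiv track=rewrite | github.com/captaindrewsa/Mol-Bot | BioMethods.py | ReverseNa
-- ===== SOURCE A (Python) =====
-- def ReverseNa(NA):
--     ret_NA=''
--
--     if len(NA)%70 == 0:
--         for i in range(0,len(NA)//70):
--             ret_NA+=(NA[::-1])[70*i:70*(i+1)]
--             ret_NA+='\n'
--         return ret_NA.upper()
--     else:
--         for i in range(0,len(NA)//70):
--             ret_NA+=(NA[::-1])[70*i:70*(i+1)]
--             ret_NA+='\n'
--         ret_NA+=NA[::-1][len(NA)-len(NA)%70:]+'\n'
--         return ret_NA.upper()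
-- ===== SOURCE B (Python) =====
-- def ReverseNa(NA):
--     s = NA[::-1]
--     parts = []
--     while s:
--         parts.append(s[:70] + '\n')
--         s = s[70:]
--     return ''.join(parts).upper()
-- ===== Notes on version B (the rewrite author's own statement) =====
-- stated objective: simpler
-- what changed: Replaces A's duplicated index-slicing loops with one len%70 branch by a single while loop that consumes the reversed string 70 characters at a time, emitting each chunk with its newline.
import Mathlib
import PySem

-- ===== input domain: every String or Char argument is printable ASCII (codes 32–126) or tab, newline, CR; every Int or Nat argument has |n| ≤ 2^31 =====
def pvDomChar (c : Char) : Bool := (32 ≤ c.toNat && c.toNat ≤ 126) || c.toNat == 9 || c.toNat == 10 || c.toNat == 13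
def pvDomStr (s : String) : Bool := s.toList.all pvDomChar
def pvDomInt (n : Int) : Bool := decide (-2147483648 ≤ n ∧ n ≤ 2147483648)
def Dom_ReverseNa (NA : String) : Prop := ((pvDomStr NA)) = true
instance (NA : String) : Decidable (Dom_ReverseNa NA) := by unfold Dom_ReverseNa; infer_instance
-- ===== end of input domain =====

-- B replaces A's duplicated index-slicing loops (branching on len%70) by one while loop that
-- consumes the reversed string 70 characters at a time (objective: simpler).

-- ===== PORT A =====
-- literal port of A; works on the code-point list, `NA[::-1]` is `.reverse`
-- (PySem.List.slice?_none_none_neg_one), `//` is PySem.Int.floordiv, `.upper()` is PySem.Str.upper.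
def ReverseNa (NA : String) : String :=
  let l := NA.toList
  let loop : List Char :=
    (PySem.List.pyRange 0 (PySem.Int.floordiv (l.length : Int) 70) 1).foldl
      (fun acc i =>
        (acc ++ PySem.List.slice l.reverse (some (70 * i)) (some (70 * (i + 1)))) ++ ['\n']) []
  if (l.length : Int) % 70 = 0 then
    PySem.Str.upper (String.ofList loop)
  else
    PySem.Str.upper (String.ofList
      ((loop ++ PySem.List.slice l.reverse
          (some ((l.length : Int) - (l.length : Int) % 70)) none) ++ ['\n']))

-- ===== PORT B =====
-- literal port of B's while loop: peel s[:70]+'\n', continue with s[70:].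
def chunkNl : List Char → List Char
  | [] => []
  | c :: t => (((c :: t).take 70) ++ ['\n']) ++ chunkNl ((c :: t).drop 70)
termination_by s => s.length
decreasing_by simp

def ReverseNa_alt (NA : String) : String :=
  PySem.Str.upper (String.ofList (chunkNl NA.toList.reverse))

-- ===== PRECONDITION & SPEC =====
def Spec_ReverseNa (NA : String) (out : String) : Prop := out = ReverseNa_alt NA
instance (NA : String) (out : String) : Decidable (Spec_ReverseNa NA out) := by unfold Spec_ReverseNa; infer_instance

-- ===== CLAIM (what is proved, stated in full; the proofs are below) =====
def Claim_equal_ReverseNa : Prop := ∀ (NA : String), Dom_ReverseNa NA → Spec_ReverseNa NA (ReverseNa NA)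

-- ===== LEMMAS AND PROOFS =====

-- A's loop output (pre-upper), as a flatMap over List.range
def chunksA (l : List Char) (k : Nat) : List Char :=
  (List.range k).flatMap (fun j => (l.drop (70 * j)).take 70 ++ ['\n'])

lemma chunksA_succ (l : List Char) (k : Nat) :
    chunksA l (k + 1) = (l.take 70 ++ ['\n']) ++ chunksA (l.drop 70) k := by
  unfold chunksA
  rw [List.range_succ_eq_map]
  simp only [List.flatMap_cons, List.flatMap_map, List.drop_drop, Nat.mul_zero, List.drop_zero]
  congr 1
  exact List.flatMap_congr (fun x _ => by rw [show 70 * (x + 1) = 70 + 70 * x by ring])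

lemma chunkNl_nil : chunkNl [] = [] := by rw [chunkNl.eq_def]

lemma chunkNl_ne_nil (l : List Char) (h : l ≠ []) :
    chunkNl l = (l.take 70 ++ ['\n']) ++ chunkNl (l.drop 70) := by
  cases l with
  | nil => exact absurd rfl h
  | cons c t => rw [chunkNl.eq_def]

-- main characterisation of A's pre-upper output
lemma chunksA_eq_chunkNl (l : List Char) :
    (if l.length % 70 = 0 then chunksA l (l.length / 70)
     else chunksA l (l.length / 70) ++ l.drop (l.length - l.length % 70) ++ ['\n'])
    = chunkNl l := by
  induction hn : l.length using Nat.strong_induction_on generalizing l with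
  | _ n ih =>
    subst hn
    by_cases hnil : l = []
    · subst hnil; simp [chunksA, chunkNl_nil]
    · have hpos : 0 < l.length := List.length_pos_iff.mpr hnil
      rw [chunkNl_ne_nil l hnil]
      by_cases hlt : l.length < 70
      · have h70 : l.length / 70 = 0 := Nat.div_eq_of_lt hlt
        have hm : l.length % 70 = l.length := Nat.mod_eq_of_lt hlt
        rw [if_neg (by omega)]
        simp [chunksA, h70, hm, List.take_of_length_le (le_of_lt hlt),
              List.drop_eq_nil_of_le (le_of_lt hlt), chunkNl_nil]
      · -- l.length ≥ 70
        have hge : 70 ≤ l.length := le_of_not_gt hlt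
        have hlen' : (l.drop 70).length = l.length - 70 := by simp
        have ihx := ih (l.drop 70).length (by omega) (l.drop 70) rfl
        rw [hlen'] at ihx
        have hdivs : l.length / 70 = (l.length - 70) / 70 + 1 := by omega
        have hmods : l.length % 70 = (l.length - 70) % 70 := by omega
        rw [hdivs, chunksA_succ]
        by_cases hm : l.length % 70 = 0
        · rw [if_pos hm]
          rw [if_pos (by omega : (l.length - 70) % 70 = 0)] at ihx
          rw [ihx]
        · rw [if_neg hm]
          rw [if_neg (by omega : ¬ (l.length - 70) % 70 = 0)] at ihx
          have hdropeq : l.drop (l.length - l.length % 70)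
              = (l.drop 70).drop ((l.length - 70) - (l.length - 70) % 70) := by
            rw [List.drop_drop]
            congr 1
            omega
          rw [hdropeq, ← ihx]
          simp [List.append_assoc]

lemma loopA_eq_chunksA (r : List Char) (k : Nat) :
    (PySem.List.pyRange 0 ((k : Nat) : Int) 1).foldl
      (fun acc i =>
        (acc ++ PySem.List.slice r (some (70 * i)) (some (70 * (i + 1)))) ++ ['\n']) []
    = chunksA r k := by
  trans ((PySem.List.pyRange 0 ((k : Nat) : Int) 1).foldl
      (fun acc i =>
        acc ++ (PySem.List.slice r (some (70 * i)) (some (70 * (i + 1))) ++ ['\n'])) [])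
  · apply PySem.List.foldl_congr_mem
    intro acc x _
    rw [List.append_assoc]
  rw [PySem.List.foldl_append_eq_flatMap, PySem.List.pyRange_one]
  simp only [Int.sub_zero, Int.toNat_natCast, List.flatMap_map, List.nil_append]
  unfold chunksA
  apply List.flatMap_congr
  intro j _
  have h1 : (70 * (0 + (j : Int)) : Int) = ((70 * j : Nat) : Int) := by push_cast; ring
  have h2 : (70 * (0 + (j : Int) + 1) : Int) = ((70 * j + 70 : Nat) : Int) := by push_cast; ring
  rw [h1, h2, PySem.List.slice_natCast]
  congr 2
  omega

-- ===== VERDICT (by name: the statement is the Claim_ definition above) =====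
theorem ReverseNa_spec : Claim_equal_ReverseNa := by
  intro NA _
  unfold Spec_ReverseNa ReverseNa ReverseNa_alt
  simp only
  set l := NA.toList with hl
  have hrev : l.reverse.length = l.length := List.length_reverse
  have hK : PySem.Int.floordiv (l.length : Int) 70 = ((l.length / 70 : Nat) : Int) :=
    PySem.Int.floordiv_natCast l.length 70
  rw [hK, loopA_eq_chunksA l.reverse (l.length / 70)]
  have hchar := chunksA_eq_chunkNl l.reverse
  rw [hrev] at hchar
  by_cases hm : l.length % 70 = 0
  · rw [if_pos (by omega : ((l.length : Int)) % 70 = 0)]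
    rw [if_pos hm] at hchar
    rw [hchar]
  · rw [if_neg (by omega : ¬ ((l.length : Int)) % 70 = 0)]
    rw [if_neg hm] at hchar
    have htail : PySem.List.slice l.reverse
        (some ((l.length : Int) - (l.length : Int) % 70)) none
        = l.reverse.drop (l.length - l.length % 70) := by
      rw [show ((l.length : Int) - (l.length : Int) % 70)
            = ((l.length - l.length % 70 : Nat) : Int) by omega,
          PySem.List.slice_from_natCast]
    rw [htail, hchar]
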